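-- pv_equiv track=rewrite | github.com/IvanMalkS/AD | LAB1/6.py | find_minimal_number
-- ===== SOURCE A (Python) =====
-- def find_minimal_number(n_digits: int, s_sum: int) -> str:
--     """
--     Находит минимальное N-значное натуральное число с суммой цифр S.
--
--     Args:
--         n_digits: Требуемое количество разрядов (N).
--         s_sum: Требуемая сумма цифр (S).
--
--     Returns:
--         Строковое представление искомого числа или "NO", если такого числа нет.
--     """
--     # --- Проверка на невозможность ---
--     # 1. Сумма не может быть больше, чем если бы все N цифр были девятками.
--     # 2. По условию S >= 1. Если бы S=0 было возможно, то для N > 1 решения бы не было,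
--     #    а для N=1 число '0' не является натуральным.
--     if s_sum > 9 * n_digits or s_sum < 1:
--         return "NO"
--
--     # --- Построение числа (жадный алгоритм) ---
--     remaining_sum = s_sum
--     result_digits = []
--
--     # Итерируемся по каждой позиции цифры слева направо.
--     for i in range(n_digits):
--         is_first_digit = (i == 0)
--         num_digits_left = n_digits - 1 - i
--
--         # Определяем начальную цифру для перебора (1 для первой, 0 для остальных).
--         start_digit = 1 if is_first_digit else 0
--
--         # Находим наименьшую подходящую цифру для текущей позиции.
--         for digit in range(start_digit, 10):
--             # Проверяем, возможно ли составить оставшуюся сумму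
--             # (remaining_sum - digit) из оставшихся разрядов (num_digits_left).
--             # Минимальная возможная сумма для оставшихся - 0.
--             # Максимальная - 9 * num_digits_left.
--             if 0 <= (remaining_sum - digit) <= 9 * num_digits_left:
--                 # Нашли самую маленькую подходящую цифру, ставим ее.
--                 result_digits.append(str(digit))
--                 remaining_sum -= digit
--                 break  # Переходим к следующей позиции.
--
--     # Если после всех итераций длина результата не равна N, значит,
--     # наше предположение о существовании решения было неверным.
--     # (Хотя с текущей проверкой на невозможность это не должно произойти).
--     if len(result_digits) == n_digits:
--         return "".join(result_digits)
--     else: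
--         return "NO"
-- ===== SOURCE B (Python) =====
-- def find_minimal_number(n_digits: int, s_sum: int) -> str:
--     """Closed form: smallest feasible leading digit, then the remaining sum
--     packed to the right as a middle digit followed by nines, zeros between."""
--     if s_sum > 9 * n_digits or s_sum < 1:
--         return "NO"
--     lead = max(1, s_sum - 9 * (n_digits - 1))
--     t, m = divmod(s_sum - lead, 9)
--     mid = str(m) if m else ""
--     return str(lead) + "0" * (n_digits - 1 - t - len(mid)) + mid + "9" * t
-- ===== Notes on version B (the rewrite author's own statement) =====
-- stated objective: simpler
-- what changed: Replaces A's left-to-right greedy loop with a 0-9 feasibility search at every position by a closed-form construction: smallest feasible leading digit max(1, s-9(n-1)), then divmod packs the rest as zeros, one middle digit and trailing nines.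
import Mathlib
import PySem

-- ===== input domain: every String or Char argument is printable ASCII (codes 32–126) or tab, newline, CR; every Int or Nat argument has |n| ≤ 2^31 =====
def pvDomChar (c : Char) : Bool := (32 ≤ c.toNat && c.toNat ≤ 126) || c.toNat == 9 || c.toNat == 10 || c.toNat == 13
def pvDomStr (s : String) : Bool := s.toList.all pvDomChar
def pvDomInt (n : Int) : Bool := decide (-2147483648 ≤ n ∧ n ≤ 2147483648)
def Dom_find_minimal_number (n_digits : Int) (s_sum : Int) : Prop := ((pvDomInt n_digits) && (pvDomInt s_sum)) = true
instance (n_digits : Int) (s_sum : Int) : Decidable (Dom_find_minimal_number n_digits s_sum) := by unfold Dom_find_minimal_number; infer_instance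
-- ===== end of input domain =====

-- B replaces A's per-position greedy search loop by a closed form (lead digit, zeros, one middle
-- digit, trailing nines) computed with O(1) arithmetic; objective: simpler.

-- ===== PORT A =====
-- A's inner loop 'for digit in range(start, 10): if 0 <= rem-digit <= 9*left: … break'
-- as a first-match search over the same range list.
def pvSearch (rem : Int) (left : Int) : List Int → Option Int
  | [] => none
  | d :: ds => if 0 ≤ rem - d ∧ rem - d ≤ 9 * left then some d else pvSearch rem left ds

-- the body of A's outer loop for one position i (state = (remaining_sum, result_digits))
def pvStep (n_digits : Int) (st : Int × List String) (i : Int) : Int × List String :=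
  let start : Int := if i = 0 then 1 else 0
  let left : Int := n_digits - 1 - i
  match pvSearch st.1 left (PySem.List.pyRange start 10 1) with
  | some d => (st.1 - d, st.2 ++ [PySem.Int.toStr d])
  | none => st

def find_minimal_number (n_digits : Int) (s_sum : Int) : String :=
  if s_sum > 9 * n_digits ∨ s_sum < 1 then "NO"
  else
    let st := (PySem.List.pyRange 0 n_digits 1).foldl (pvStep n_digits) (s_sum, ([] : List String))
    if (st.2.length : Int) = n_digits then PySem.Str.join "" st.2 else "NO"

-- ===== PORT B =====
def find_minimal_number_alt (n_digits : Int) (s_sum : Int) : String :=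
  if s_sum > 9 * n_digits ∨ s_sum < 1 then "NO"
  else
    let lead := max 1 (s_sum - 9 * (n_digits - 1))
    let t := PySem.Int.floordiv (s_sum - lead) 9     -- t, m = divmod(s_sum - lead, 9)
    let m := PySem.Int.mod (s_sum - lead) 9
    let mid : List Char := if m = 0 then [] else PySem.Int.toChars m   -- str(m) if m else ""
    -- Python's str '+' and '*' are ported on List Char (exact; Lean's String.append is kernel-opaque)
    String.ofList (PySem.Int.toChars lead
      ++ List.replicate (n_digits - 1 - t - mid.length).toNat '0'
      ++ mid ++ List.replicate t.toNat '9')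

-- ===== PRECONDITION & SPEC =====
def Spec_find_minimal_number (n_digits : Int) (s_sum : Int) (out : String) : Prop := out = find_minimal_number_alt n_digits s_sum
instance (n_digits : Int) (s_sum : Int) (out : String) : Decidable (Spec_find_minimal_number n_digits s_sum out) := by unfold Spec_find_minimal_number; infer_instance

-- ===== CLAIM (what is proved, stated in full; the proofs are below) =====
def Claim_equal_find_minimal_number : Prop := ∀ (n_digits : Int) (s_sum : Int), Dom_find_minimal_number n_digits s_sum → Spec_find_minimal_number n_digits s_sum (find_minimal_number n_digits s_sum)

-- ===== LEMMAS AND PROOFS =====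

-- the inner search finds exactly max(start, rem − 9·left) when that digit is feasible
lemma pvSearch_one (rem left : Int) (h0 : 1 ≤ rem) (h1 : rem ≤ 9 * left + 9) :
    pvSearch rem left (PySem.List.pyRange 1 10 1) = some (max 1 (rem - 9 * left)) := by
  have h : PySem.List.pyRange 1 10 1 = [1,2,3,4,5,6,7,8,9] := by decide
  rw [h]; simp only [pvSearch]
  split_ifs <;> (try simp only [Option.some.injEq]) <;> omega

lemma pvSearch_zero (rem left : Int) (h0 : 0 ≤ rem) (h1 : rem ≤ 9 * left + 9) (hl : 0 ≤ left) :
    pvSearch rem left (PySem.List.pyRange 0 10 1) = some (max 0 (rem - 9 * left)) := by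
  have h : PySem.List.pyRange 0 10 1 = [0,1,2,3,4,5,6,7,8,9] := by decide
  rw [h]; simp only [pvSearch]
  split_ifs <;> (try simp only [Option.some.injEq]) <;> omega

-- closed form of the digit strings A appends at the non-leading positions
def pvTail (k : Nat) (rem : Int) : List String :=
  if rem % 9 = 0 then
    List.replicate (k - (rem / 9).toNat) (PySem.Int.toStr 0)
      ++ List.replicate ((rem / 9).toNat) (PySem.Int.toStr 9)
  else
    List.replicate (k - (rem / 9).toNat - 1) (PySem.Int.toStr 0)
      ++ PySem.Int.toStr (rem % 9) :: List.replicate ((rem / 9).toNat) (PySem.Int.toStr 9)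

lemma pvTail_loop (n : Int) (k : Nat) (rem : Int) (acc : List String)
    (hk : (k : Int) ≤ n - 1) (h0 : 0 ≤ rem) (h1 : rem ≤ 9 * (k : Int)) :
    (PySem.List.pyRange (n - k) n 1).foldl (pvStep n) (rem, acc) = (0, acc ++ pvTail k rem) := by
  induction k generalizing rem acc with
  | zero =>
    have hrem : rem = 0 := by omega
    subst hrem
    rw [show n - ((0:Nat):Int) = n by push_cast; ring]
    rw [PySem.List.pyRange_one_eq_nil (le_refl n)]
    simp [pvTail]
  | succ k ih =>
    have hlt : n - ((k+1 : Nat):Int) < n := by push_cast; omega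
    rw [PySem.List.pyRange_one_cons hlt, List.foldl_cons]
    rw [show n - ((k+1:Nat):Int) + 1 = n - (k:Nat) by push_cast; ring]
    have hstep : pvStep n (rem, acc) (n - ((k+1:Nat):Int))
        = (rem - max 0 (rem - 9*(k:Int)), acc ++ [PySem.Int.toStr (max 0 (rem - 9*(k:Int)))]) := by
      simp only [pvStep]
      rw [if_neg (by push_cast; omega : ¬ (n - ((k+1:Nat):Int) = 0))]
      rw [show n - 1 - (n - ((k+1:Nat):Int)) = (k:Int) by push_cast; ring]
      rw [pvSearch_zero rem k h0 (by push_cast at h1 ⊢; omega) (by positivity)]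
    rw [hstep]
    by_cases hc : rem ≤ 9*(k:Int)
    · rw [show max 0 (rem - 9*(k:Int)) = 0 by omega]
      rw [show rem - 0 = rem by ring]
      rw [ih rem (acc ++ [PySem.Int.toStr 0]) (by omega) h0 hc]
      rw [List.append_assoc]
      congr 1
      unfold pvTail
      have hq : 0 ≤ rem / 9 ∧ rem / 9 ≤ (k:Int) ∧ 9 * (rem/9) + rem % 9 = rem ∧ 0 ≤ rem % 9 := by omega
      split_ifs with hm
      · rw [show (k+1) - (rem/9).toNat = ((k - (rem/9).toNat) + 1) by omega]
        simp [List.replicate_succ]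
      · rw [show (k+1) - (rem/9).toNat - 1 = ((k - (rem/9).toNat - 1) + 1) by omega]
        simp [List.replicate_succ]
    · rw [show max 0 (rem - 9*(k:Int)) = rem - 9*(k:Int) by omega]
      rw [show rem - (rem - 9*(k:Int)) = 9*(k:Int) by ring]
      rw [ih (9*(k:Int)) _ (by omega) (by omega) (le_refl _)]
      rw [List.append_assoc]
      congr 1
      have h90 : (9*(k:Int)) % 9 = 0 := by omega
      have h9d : ((9*(k:Int)) / 9).toNat = k := by omega
      unfold pvTail
      rw [if_pos h90, h9d]
      simp only [Nat.sub_self, List.replicate_zero, List.nil_append]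
      by_cases hm : rem % 9 = 0
      · rw [if_pos hm]
        have : rem = 9*((k:Int)+1) := by omega
        rw [show rem - 9*(k:Int) = 9 by omega]
        rw [show (rem/9).toNat = k + 1 by omega]
        simp [List.replicate_succ]
      · rw [if_neg hm]
        have ht : (rem/9).toNat = k := by omega
        rw [ht, show rem - 9*(k:Int) = rem % 9 by omega]
        simp

lemma pvTail_length (k : Nat) (rem : Int) (h0 : 0 ≤ rem) (h1 : rem ≤ 9 * (k : Int)) :
    (pvTail k rem).length = k := by
  unfold pvTail
  split_ifs <;> simp <;> omega

lemma pvJoin_nil (l : List (List Char)) : PySem.Chars.join [] l = l.flatten := by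
  show [].intercalate l = l.flatten
  induction l with
  | nil => rfl
  | cons a t ih =>
    cases t with
    | nil => simp [List.intercalate]
    | cons b u =>
      simp only [List.intercalate] at *
      simp [List.intersperse] at *
      simpa using ih

lemma pvTail_chars (k : Nat) (rem : Int) :
    ((pvTail k rem).map String.toList).flatten
      = List.replicate (k - (rem/9).toNat - (if rem % 9 = 0 then 0 else 1)) '0'
        ++ (if rem % 9 = 0 then [] else PySem.Int.toChars (rem % 9))
        ++ List.replicate ((rem/9).toNat) '9' := by
  unfold pvTail
  split_ifs with hm <;>
    simp [List.map_replicate, PySem.Int.toList_toStr,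
      show PySem.Int.toChars 0 = ['0'] from by decide,
      show PySem.Int.toChars 9 = ['9'] from by decide]

-- ===== VERDICT (by name: the statement is the Claim_ definition above) =====
theorem find_minimal_number_spec : Claim_equal_find_minimal_number := by
  intro n s _hdom
  unfold Spec_find_minimal_number find_minimal_number find_minimal_number_alt
  by_cases hg : s > 9 * n ∨ s < 1
  · rw [if_pos hg, if_pos hg]
  · rw [if_neg hg, if_neg hg]
    have h1 : 1 ≤ s := by omega
    have h2 : s ≤ 9 * n := by omega
    have hn : 1 ≤ n := by nlinarith
    have hlead1 : 1 ≤ max 1 (s - 9 * (n - 1)) := le_max_left _ _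
    have hlead9 : max 1 (s - 9 * (n - 1)) ≤ 9 := by omega
    have hleads : max 1 (s - 9 * (n - 1)) ≤ s := by omega
    rw [PySem.List.pyRange_one_cons (by omega : (0:Int) < n), List.foldl_cons]
    have hstep : pvStep n (s, ([] : List String)) 0
        = (s - max 1 (s - 9 * (n - 1)), [PySem.Int.toStr (max 1 (s - 9 * (n - 1)))]) := by
      simp only [pvStep, if_true]
      rw [show n - 1 - 0 = n - 1 by ring]
      rw [pvSearch_one s (n-1) h1 (by omega)]
      simp
    rw [hstep]
    set k : Nat := (n - 1).toNat with hk
    have hkc : (k : Int) = n - 1 := by omega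
    rw [show (0:Int) + 1 = n - (k : Int) by omega]
    set r : Int := s - max 1 (s - 9 * (n - 1)) with hr
    have hr0 : 0 ≤ r := by omega
    have hr1 : r ≤ 9 * (k : Int) := by omega
    rw [pvTail_loop n k r _ (by omega) hr0 hr1]
    have hlen : (((([PySem.Int.toStr (max 1 (s - 9 * (n - 1)))] ++ pvTail k r)).length : Int)) = n := by
      simp [pvTail_length k r hr0 hr1]; omega
    simp only []
    rw [if_pos hlen]
    -- string equality, proved on .toList
    refine String.toList_inj.mp ?_
    rw [PySem.Str.toList_join]
    rw [show ("" : String).toList = [] from rfl]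
    rw [pvJoin_nil]
    rw [String.toList_ofList]
    simp only [List.map_append, List.map_cons, List.map_nil, List.flatten_append,
      List.flatten_cons, List.flatten_nil, PySem.Int.toList_toStr]
    rw [pvTail_chars k r]
    rw [PySem.Int.floordiv_eq_ediv_of_pos (by norm_num), PySem.Int.mod_eq_emod_of_pos (by norm_num)]
    rw [← hr]
    by_cases hm : r % 9 = 0
    · rw [if_pos hm, if_pos hm]
      simp only [List.length_nil, List.append_nil, Nat.cast_zero, List.append_assoc]
      rw [show (n - 1 - r / 9 - 0).toNat = k - (r / 9).toNat - 0 by omega]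
    · rw [if_neg hm, if_neg hm]
      have hlen1 : (PySem.Int.toChars (r % 9)).length = 1 := by
        have h8 : 1 ≤ r % 9 ∧ r % 9 ≤ 8 := by omega
        obtain ⟨a, b⟩ := h8
        interval_cases h : r % 9 <;> decide
      rw [hlen1]
      simp only [Nat.cast_one, List.append_assoc]
      rw [show (n - 1 - r / 9 - 1).toNat = k - (r / 9).toNat - 1 by omega]
      simp
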